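-- pv_equiv track=rewrite | github.com/GuanxingLu/miles | examples/parl_v2/math/reward.py | _turn_spans
-- ===== SOURCE A (Python) =====
-- def _turn_spans(loss_mask: list[int]) -> list[tuple[int, int]]:
--     """Return [start, end) half-open intervals of contiguous loss_mask=1 runs."""
--     spans = []
--     n = len(loss_mask)
--     i = 0
--     while i < n:
--         if loss_mask[i] == 1:
--             j = i
--             while j < n and loss_mask[j] == 1:
--                 j += 1
--             spans.append((i, j))
--             i = j
--         else:
--             i += 1
--     return spans
-- ===== SOURCE B (Python) =====
-- def _turn_spans(loss_mask: list[int]) -> list[tuple[int, int]]: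
--     """Return [start, end) half-open intervals of contiguous loss_mask=1 runs."""
--     spans = []
--     in_run = False
--     start = 0
--     for i, v in enumerate(loss_mask):
--         cur = (v == 1)
--         if cur and not in_run:
--             start = i
--             in_run = True
--         elif (not cur) and in_run:
--             spans.append((start, i))
--             in_run = False
--     if in_run:
--         spans.append((start, len(loss_mask)))
--     return spans
-- ===== Notes on version B (the rewrite author's own statement) =====
-- stated objective: simpler
-- what changed: Replaced the nested outer/inner while loops (inner scan to find each run's end) by a single flat for-loop state machine with an in_run flag and start index, flushing a trailing open run after the loop.
import Mathlib
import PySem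

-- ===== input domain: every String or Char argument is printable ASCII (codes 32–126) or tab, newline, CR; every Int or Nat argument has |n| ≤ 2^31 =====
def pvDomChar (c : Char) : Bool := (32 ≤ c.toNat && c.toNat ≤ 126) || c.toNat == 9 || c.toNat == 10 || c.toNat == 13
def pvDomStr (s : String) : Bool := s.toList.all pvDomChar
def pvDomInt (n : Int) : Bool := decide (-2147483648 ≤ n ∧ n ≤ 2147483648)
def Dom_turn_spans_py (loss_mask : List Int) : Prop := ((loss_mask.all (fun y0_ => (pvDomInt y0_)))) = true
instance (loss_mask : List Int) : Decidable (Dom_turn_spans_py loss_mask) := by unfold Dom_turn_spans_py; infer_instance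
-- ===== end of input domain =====

-- B replaces A's nested while loops by a single flat state-machine pass (in_run flag + start index); same O(n) cost, simpler shape.

-- ===== PORT A =====
-- inner 'while j < n and loss_mask[j] == 1: j += 1' — returns the final j.
-- fuel is a pure totality guard (always called with fuel ≥ lm.length - j, so it never cuts the loop short).
def pvAInner (lm : List Int) (fuel : Nat) (j : Nat) : Nat :=
  match fuel with
  | 0 => j
  | fuel + 1 =>
    if h : j < lm.length then
      if lm[j] = 1 then pvAInner lm fuel (j+1) else j
    else j

-- outer 'while i < n: …'; fuel is again only a totality guard
def pvAOuter (lm : List Int) (fuel : Nat) (i : Nat) (spans : List (Int × Int)) : List (Int × Int) :=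
  match fuel with
  | 0 => spans
  | fuel + 1 =>
    if h : i < lm.length then
      if lm[i] = 1 then
        let j := pvAInner lm (lm.length - i) i
        pvAOuter lm fuel j (spans ++ [((i : Int), (j : Int))])
      else
        pvAOuter lm fuel (i+1) spans
    else spans

def turn_spans_py (loss_mask : List Int) : List (Int × Int) :=
  pvAOuter loss_mask loss_mask.length 0 []

-- ===== PORT B =====
-- flat for-loop over the list with state (in_run, start); the [] case is the post-loop flush (i = len there)
def pvBGo (rest : List Int) (i : Nat) (inRun : Bool) (start : Nat)
    (spans : List (Int × Int)) : List (Int × Int) :=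
  match rest with
  | [] => if inRun then spans ++ [((start : Int), (i : Int))] else spans
  | v :: t =>
    if v = 1 ∧ inRun = false then
      pvBGo t (i+1) true i spans
    else if ¬ v = 1 ∧ inRun = true then
      pvBGo t (i+1) false start (spans ++ [((start : Int), (i : Int))])
    else
      pvBGo t (i+1) inRun start spans

def turn_spans_py_alt (loss_mask : List Int) : List (Int × Int) :=
  pvBGo loss_mask 0 false 0 []

-- ===== PRECONDITION & SPEC =====
def Spec_turn_spans_py (loss_mask : List Int) (out : List (Int × Int)) : Prop := out = turn_spans_py_alt loss_mask
instance (loss_mask : List Int) (out : List (Int × Int)) : Decidable (Spec_turn_spans_py loss_mask out) := by unfold Spec_turn_spans_py; infer_instance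

-- ===== CLAIM (what is proved, stated in full; the proofs are below) =====
def Claim_equal_turn_spans_py : Prop := ∀ (loss_mask : List Int), Dom_turn_spans_py loss_mask → Spec_turn_spans_py loss_mask (turn_spans_py loss_mask)

-- ===== LEMMAS AND PROOFS =====

theorem pvAInner_ge (lm : List Int) : ∀ (f j : Nat), j ≤ pvAInner lm f j := by
  intro f
  induction f with
  | zero => intro j; simp [pvAInner]
  | succ f ih =>
    intro j
    simp only [pvAInner]
    split_ifs with h h1
    · exact Nat.le_trans (Nat.le_succ j) (ih (j+1))
    · omega
    · omega

theorem pvAInner_stop_ge (lm : List Int) (f j : Nat) (h : lm.length ≤ j) :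
    pvAInner lm f j = j := by
  cases f with
  | zero => rfl
  | succ f => simp [pvAInner, Nat.not_lt.mpr h]

theorem pvAInner_stop_ne (lm : List Int) (j : Nat) (hj : j < lm.length)
    (h1 : ¬ lm[j] = 1) : pvAInner lm (lm.length - j) j = j := by
  have : lm.length - j = (lm.length - j - 1) + 1 := by omega
  rw [this]; simp [pvAInner, hj, h1]

theorem pvAInner_step (lm : List Int) (j : Nat) (hj : j < lm.length)
    (h1 : lm[j] = 1) :
    pvAInner lm (lm.length - j) j = pvAInner lm (lm.length - (j+1)) (j+1) := by
  have he : lm.length - j = (lm.length - (j+1)) + 1 := by omega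
  rw [he]; simp [pvAInner, hj, h1]

theorem pvAInner_canon_ge (lm : List Int) (j : Nat) (hj : j < lm.length)
    (h1 : lm[j] = 1) : j + 1 ≤ pvAInner lm (lm.length - j) j := by
  rw [pvAInner_step lm j hj h1]; exact pvAInner_ge lm _ (j+1)

-- fuel irrelevance for the outer loop: any sufficient fuel gives the same result
theorem pvAOuter_fuel (lm : List Int) : ∀ (f g i : Nat) (spans : List (Int × Int)),
    lm.length - i ≤ f → lm.length - i ≤ g →
    pvAOuter lm f i spans = pvAOuter lm g i spans := by
  intro f
  induction f with
  | zero =>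
    intro g i spans hf hg
    have hge : lm.length ≤ i := by omega
    cases g with
    | zero => rfl
    | succ g => simp [pvAOuter, Nat.not_lt.mpr hge]
  | succ f ih =>
    intro g i spans hf hg
    by_cases hi : i < lm.length
    · cases g with
      | zero => omega
      | succ g =>
        simp only [pvAOuter, hi, dif_pos]
        by_cases h1 : lm[i] = 1
        · simp only [h1, if_pos]
          have hj := pvAInner_canon_ge lm i hi h1
          exact ih g (pvAInner lm (lm.length - i) i) _ (by omega) (by omega)
        · simp only [h1, if_neg, not_false_iff]
          exact ih g (i+1) spans (by omega) (by omega)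
    · cases g with
      | zero => cases f <;> simp [pvAOuter, hi]
      | succ g => simp [pvAOuter, hi]

-- canonical-fuel view of the outer loop, used to state the key invariant
def pvC (lm : List Int) (i : Nat) (spans : List (Int × Int)) : List (Int × Int) :=
  pvAOuter lm (lm.length - i) i spans

theorem pvC_stop (lm : List Int) (i : Nat) (spans : List (Int × Int))
    (h : lm.length ≤ i) : pvC lm i spans = spans := by
  unfold pvC
  have h0 : lm.length - i = 0 := by omega
  rw [h0]; rfl

theorem pvC_zero (lm : List Int) (i : Nat) (spans : List (Int × Int))
    (hi : i < lm.length) (h1 : ¬ lm[i] = 1) :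
    pvC lm i spans = pvC lm (i+1) spans := by
  unfold pvC
  have he : lm.length - i = (lm.length - (i+1)) + 1 := by omega
  rw [he]; simp [pvAOuter, hi, h1]

theorem pvC_one (lm : List Int) (i : Nat) (spans : List (Int × Int))
    (hi : i < lm.length) (h1 : lm[i] = 1) :
    pvC lm i spans =
      pvC lm (pvAInner lm (lm.length - i) i)
        (spans ++ [((i : Int), ((pvAInner lm (lm.length - i) i) : Int))]) := by
  have he : lm.length - i = (lm.length - (i+1)) + 1 := by omega
  have hj := pvAInner_canon_ge lm i hi h1
  calc pvC lm i spans
      = pvAOuter lm ((lm.length - (i+1)) + 1) i spans := by unfold pvC; rw [he]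
    _ = pvAOuter lm (lm.length - (i+1)) (pvAInner lm (lm.length - i) i)
          (spans ++ [((i : Int), ((pvAInner lm (lm.length - i) i) : Int))]) := by
        simp [pvAOuter, hi, h1, he]
    _ = pvC lm (pvAInner lm (lm.length - i) i)
          (spans ++ [((i : Int), ((pvAInner lm (lm.length - i) i) : Int))]) := by
        unfold pvC
        exact pvAOuter_fuel lm (lm.length - (i+1))
          (lm.length - pvAInner lm (lm.length - i) i) (pvAInner lm (lm.length - i) i)
          (spans ++ [((i : Int), ((pvAInner lm (lm.length - i) i) : Int))])
          (by omega) (by omega)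

theorem pvBGo_nil (i : Nat) (inRun : Bool) (start : Nat) (spans : List (Int × Int)) :
    pvBGo [] i inRun start spans =
      if inRun then spans ++ [((start : Int), (i : Int))] else spans := rfl

theorem pvBGo_open (v : Int) (t : List Int) (i : Nat) (start : Nat)
    (spans : List (Int × Int)) (h1 : v = 1) :
    pvBGo (v :: t) i false start spans = pvBGo t (i+1) true i spans := by
  simp [pvBGo, h1]

theorem pvBGo_close (v : Int) (t : List Int) (i : Nat) (start : Nat)
    (spans : List (Int × Int)) (h1 : ¬ v = 1) :
    pvBGo (v :: t) i true start spans =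
      pvBGo t (i+1) false start (spans ++ [((start : Int), (i : Int))]) := by
  simp [pvBGo, h1]

theorem pvBGo_keep_true (v : Int) (t : List Int) (i : Nat) (start : Nat)
    (spans : List (Int × Int)) (h1 : v = 1) :
    pvBGo (v :: t) i true start spans = pvBGo t (i+1) true start spans := by
  simp [pvBGo, h1]

theorem pvBGo_keep_false (v : Int) (t : List Int) (i : Nat) (start : Nat)
    (spans : List (Int × Int)) (h1 : ¬ v = 1) :
    pvBGo (v :: t) i false start spans = pvBGo t (i+1) false start spans := by
  simp [pvBGo, h1]

theorem pvKey (lm : List Int) (k : Nat) :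
    ∀ (i : Nat), lm.length - i ≤ k → ∀ (inRun : Bool) (s : Nat) (spans : List (Int × Int)),
      pvBGo (lm.drop i) i inRun s spans =
        (if inRun then
          pvC lm (pvAInner lm (lm.length - i) i)
            (spans ++ [((s : Int), ((pvAInner lm (lm.length - i) i) : Int))])
        else pvC lm i spans) := by
  induction k with
  | zero =>
    intro i hk inRun s spans
    have hge : lm.length ≤ i := by omega
    rw [List.drop_eq_nil_of_le hge, pvBGo_nil, pvAInner_stop_ge lm _ i hge]
    cases inRun with
    | false => simp [pvC_stop lm i spans hge]
    | true => simp [pvC_stop lm i _ hge]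
  | succ k ih =>
    intro i hk inRun s spans
    by_cases hi : i < lm.length
    · rw [List.drop_eq_getElem_cons hi]
      by_cases h1 : lm[i] = 1
      · cases inRun with
        | false =>
          rw [pvBGo_open _ _ _ _ _ h1, ih (i+1) (by omega) true i spans]
          simp only [if_true, Bool.false_eq_true, if_false]
          rw [pvC_one lm i spans hi h1, pvAInner_step lm i hi h1]
        | true =>
          rw [pvBGo_keep_true _ _ _ _ _ h1, ih (i+1) (by omega) true s spans]
          simp only [if_true]
          rw [pvAInner_step lm i hi h1]
      · cases inRun with
        | false =>
          rw [pvBGo_keep_false _ _ _ _ _ h1, ih (i+1) (by omega) false s spans]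
          simp only [Bool.false_eq_true, if_false]
          rw [pvC_zero lm i spans hi h1]
        | true =>
          rw [pvBGo_close _ _ _ _ _ h1,
            ih (i+1) (by omega) false s (spans ++ [((s : Int), (i : Int))])]
          simp only [if_true, Bool.false_eq_true, if_false]
          rw [pvAInner_stop_ne lm i hi h1, pvC_zero lm i _ hi h1]
    · have hge : lm.length ≤ i := by omega
      rw [List.drop_eq_nil_of_le hge, pvBGo_nil, pvAInner_stop_ge lm _ i hge]
      cases inRun with
      | false => simp [pvC_stop lm i spans hge]
      | true => simp [pvC_stop lm i _ hge]

-- ===== VERDICT (by name: the statement is the Claim_ definition above) =====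
theorem turn_spans_py_spec : Claim_equal_turn_spans_py := by
  intro lm _
  unfold Spec_turn_spans_py turn_spans_py turn_spans_py_alt
  have h := pvKey lm lm.length 0 (by omega) false 0 []
  simp only [List.drop_zero, Bool.false_eq_true, if_false] at h
  rw [h]
  unfold pvC
  exact pvAOuter_fuel lm lm.length (lm.length - 0) 0 [] (by omega) (by omega)
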